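-- pv_equiv track=rewrite | github.com/ledu1017/baekjoon | 이분 탐색/10816.py | card_count
-- ===== SOURCE A (Python) =====
-- def card_count(input_num_A, input_num_B, card_dict):
--     for i in input_num_A:
--         start = 0
--         end = len(input_num_B) - 1
--         while start <= end:
--             middle = (start+end) // 2
--             if input_num_B[middle] == i:
--                 card_dict[i] += 1
--                 break
--             elif input_num_B[middle] > i:
--                 end = middle -1
--             else:
--                 start = middle + 1
--
--     return card_dict
-- ===== SOURCE B (Python) =====
-- def card_count(input_num_A, input_num_B, card_dict):
--     present = set(input_num_B)
--     for i in input_num_A: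
--         if i in present:
--             card_dict[i] += 1
--     return card_dict
-- ===== Notes on version B (the rewrite author's own statement) =====
-- stated objective: faster
-- what changed: Replaces the per-query binary search over the sorted list with a hash set of input_num_B built once, so each query is an O(1) membership test instead of an O(log n) probe sequence.
-- outside the precondition, e.g. on card_count([1], [0, 2, 1], {1: 0}): A returns {1: 0}, B returns {1: 1}
import Mathlib
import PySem

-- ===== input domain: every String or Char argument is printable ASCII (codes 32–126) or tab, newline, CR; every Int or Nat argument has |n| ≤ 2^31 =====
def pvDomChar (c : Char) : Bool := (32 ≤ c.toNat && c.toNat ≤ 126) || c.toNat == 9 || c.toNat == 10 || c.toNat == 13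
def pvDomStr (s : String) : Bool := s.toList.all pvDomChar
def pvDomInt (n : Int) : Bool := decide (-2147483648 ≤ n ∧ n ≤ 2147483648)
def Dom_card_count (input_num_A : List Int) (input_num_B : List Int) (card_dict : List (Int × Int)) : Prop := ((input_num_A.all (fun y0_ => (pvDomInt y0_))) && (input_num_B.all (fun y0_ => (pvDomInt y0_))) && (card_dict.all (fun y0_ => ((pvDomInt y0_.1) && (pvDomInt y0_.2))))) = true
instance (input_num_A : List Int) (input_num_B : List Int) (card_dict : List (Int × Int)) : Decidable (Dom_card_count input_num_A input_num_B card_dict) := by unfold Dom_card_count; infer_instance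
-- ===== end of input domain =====

-- B replaces the per-query binary search with a set of input_num_B built once (objective: faster);
-- both A and B mutate card_dict in place in Python — the equivalence proved here is about the return value.

-- ===== PORT A =====
-- the `while start <= end` binary-search loop of A, one recursive call per iteration;
-- returns whether the `break` (a hit) was taken.  The `none` branch of pyGet? (IndexError)
-- is a totality guard only: at the call site 0 ≤ start and end < len input_num_B always hold.
def card_count_search (input_num_B : List Int) (i : Int) (start : Int) (end_ : Int) : Bool :=
  if _h : start ≤ end_ then
    let middle := PySem.Int.floordiv (start + end_) 2
    match PySem.List.pyGet? input_num_B middle with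
    | some v =>
      if v = i then true
      else if v > i then card_count_search input_num_B i start (middle - 1)
      else card_count_search input_num_B i (middle + 1) end_
    | none => false
  else false
termination_by (end_ + 1 - start).toNat
decreasing_by
  · have := PySem.Int.floordiv_two_mid_bounds (lo := start) (hi := end_) _h
    omega
  · have := PySem.Int.floordiv_two_mid_bounds (lo := start) (hi := end_) _h
    omega

-- `card_dict[i] += 1` (overwrite keeps position).  Python raises KeyError when i is absent;
-- Pre_card_count excludes exactly those inputs, so the absent-key branch of `modify` is never taken there.
def card_count (input_num_A : List Int) (input_num_B : List Int) (card_dict : List (Int × Int)) : List (Int × Int) :=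
  (input_num_A.foldl
    (fun d i =>
      if card_count_search input_num_B i 0 (PySem.List.len input_num_B - 1) then
        d.modify i 0 (· + 1)
      else d)
    (PySem.Dict.mk card_dict)).items

-- ===== PORT B =====
def card_count_alt (input_num_A : List Int) (input_num_B : List Int) (card_dict : List (Int × Int)) : List (Int × Int) :=
  let present : PySem.Set Int := PySem.Set.ofList input_num_B
  (input_num_A.foldl
    (fun d i =>
      if PySem.Set.contains present i then d.modify i 0 (· + 1) else d)
    (PySem.Dict.mk card_dict)).items

-- ===== PRECONDITION & SPEC =====
-- Pre_ excludes (a) inputs where Python A raises KeyError (a queried value found in input_num_B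
-- but absent from card_dict), and (b) inputs with unsorted input_num_B on which some queried value
-- actually occurs in input_num_B: there A still returns, but its found/not-found decisions are an
-- artefact of the binary-search probe sequence on input violating the binary-search contract
-- (problem 10816 sorts B before searching); when no queried value occurs in input_num_B the
-- search can never hit, so unsorted inputs are kept.
def Pre_card_count (input_num_A : List Int) (input_num_B : List Int) (card_dict : List (Int × Int)) : Prop :=
  (∀ i ∈ input_num_A, i ∈ input_num_B → i ∈ card_dict.map Prod.fst) ∧
  (input_num_B.Pairwise (· ≤ ·) ∨ ∀ i ∈ input_num_A, i ∉ input_num_B)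
instance (input_num_A : List Int) (input_num_B : List Int) (card_dict : List (Int × Int)) : Decidable (Pre_card_count input_num_A input_num_B card_dict) := by unfold Pre_card_count; infer_instance

def pvWitness_card_count : List Int × List Int × (List (Int × Int)) :=
  ([3, 1, 1, 9], [1, 2, 3, 5], [(3, 0), (1, 2), (9, 7)])

def Spec_card_count (input_num_A : List Int) (input_num_B : List Int) (card_dict : List (Int × Int)) (out : List (Int × Int)) : Prop := out = card_count_alt input_num_A input_num_B card_dict
instance (input_num_A : List Int) (input_num_B : List Int) (card_dict : List (Int × Int)) (out : List (Int × Int)) : Decidable (Spec_card_count input_num_A input_num_B card_dict out) := by unfold Spec_card_count; infer_instance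

-- ===== CLAIM (what is proved, stated in full; the proofs are below) =====
def Claim_equal_card_count : Prop := ∀ (input_num_A : List Int) (input_num_B : List Int) (card_dict : List (Int × Int)), Dom_card_count input_num_A input_num_B card_dict → Pre_card_count input_num_A input_num_B card_dict → Spec_card_count input_num_A input_num_B card_dict (card_count input_num_A input_num_B card_dict)

-- ===== LEMMAS AND PROOFS =====

-- soundness: a hit of the binary search is a member of the list (no sortedness needed)
lemma mem_of_search (B : List Int) (i : Int) :
    ∀ (n : Nat) (lo hi : Int), (hi + 1 - lo).toNat = n →
      card_count_search B i lo hi = true → i ∈ B := by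
  intro n
  induction n using Nat.strong_induction_on with
  | _ n ih =>
    intro lo hi hn h
    rw [card_count_search] at h
    by_cases hle : lo ≤ hi
    · simp only [hle, dite_true] at h
      set mid := PySem.Int.floordiv (lo + hi) 2 with hmid
      have hb := PySem.Int.floordiv_two_mid_bounds (lo := lo) (hi := hi) hle
      rw [← hmid] at hb
      cases hget : PySem.List.pyGet? B mid with
      | none => rw [hget] at h; simp at h
      | some v =>
        rw [hget] at h
        by_cases hvi : v = i
        · exact hvi ▸ PySem.List.mem_of_pyGet?_eq_some B hget
        · simp only [hvi, if_false] at h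
          by_cases hgt : v > i
          · simp only [hgt, if_true] at h
            exact ih (mid - 1 + 1 - lo).toNat (by omega) lo (mid - 1) rfl h
          · simp only [hgt, if_false] at h
            exact ih (hi + 1 - (mid + 1)).toNat (by omega) (mid + 1) hi rfl h
    · simp [hle] at h

-- completeness on a sorted list: if i sits at an index inside [lo, hi] ⊆ [0, len), the search finds it
lemma search_of_mem (B : List Int) (hs : B.Pairwise (· ≤ ·)) (i : Int) :
    ∀ (n : Nat) (lo hi : Int), (hi + 1 - lo).toNat = n →
      0 ≤ lo → hi < B.length →
      (∃ (j : Nat) (hj : j < B.length), lo ≤ (j : Int) ∧ (j : Int) ≤ hi ∧ B[j] = i) →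
      card_count_search B i lo hi = true := by
  intro n
  induction n using Nat.strong_induction_on with
  | _ n ih =>
    intro lo hi hn hlo hhi ⟨j, hj, hjlo, hjhi, hji⟩
    have hle : lo ≤ hi := le_trans hjlo hjhi
    rw [card_count_search]
    simp only [hle, dite_true]
    set mid := PySem.Int.floordiv (lo + hi) 2 with hmid
    have hb := PySem.Int.floordiv_two_mid_bounds (lo := lo) (hi := hi) hle
    rw [← hmid] at hb
    have hmid0 : 0 ≤ mid := le_trans hlo hb.1
    have hmidlen : mid < B.length := lt_of_le_of_lt hb.2 hhi
    rw [PySem.List.pyGet?_eq_some_getElem B hmid0 hmidlen]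
    dsimp only
    by_cases hvi : B[mid.toNat] = i
    · simp [hvi]
    · rw [if_neg hvi]
      have hne : mid ≠ (j : Int) := by
        intro heq
        have hmj : mid.toNat = j := by omega
        exact hvi (by simp only [hmj]; exact hji)
      have hpw := List.pairwise_iff_getElem.mp hs
      by_cases hgt : B[mid.toNat] > i
      · -- i cannot sit above mid: sortedness would give B[j] ≥ B[mid] > i
        have hjlt : (j : Int) < mid := by
          by_contra hge
          push Not at hge
          have h1 : B[mid.toNat] ≤ B[j] := hpw mid.toNat j (by omega) hj (by omega)
          rw [hji] at h1
          omega
        rw [if_pos hgt]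
        exact ih (mid - 1 + 1 - lo).toNat (by omega) lo (mid - 1) rfl hlo (by omega)
          ⟨j, hj, hjlo, by omega, hji⟩
      · -- B[mid] < i, so i sits strictly above mid
        have hjgt : mid < (j : Int) := by
          by_contra hge
          push Not at hge
          have h1 : B[j] ≤ B[mid.toNat] := hpw j mid.toNat hj (by omega) (by omega)
          rw [hji] at h1
          omega
        rw [if_neg hgt]
        exact ih (hi + 1 - (mid + 1)).toNat (by omega) (mid + 1) hi rfl (by omega) hhi
          ⟨j, hj, by omega, hjhi, hji⟩

lemma search_eq_mem (B : List Int) (hs : B.Pairwise (· ≤ ·)) (i : Int) :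
    card_count_search B i 0 (PySem.List.len B - 1) = decide (i ∈ B) := by
  rw [PySem.List.len_eq]
  by_cases hm : i ∈ B
  · rcases List.mem_iff_getElem.mp hm with ⟨j, hj, hji⟩
    rw [search_of_mem B hs i (((B.length : Int) - 1) + 1 - 0).toNat 0 ((B.length : Int) - 1)
      rfl (by omega) (by omega) ⟨j, hj, by omega, by omega, hji⟩]
    simp [hm]
  · simp only [hm, decide_false]
    by_contra h
    simp only [Bool.not_eq_false] at h
    exact hm (mem_of_search B i _ 0 _ rfl h)

-- ===== VERDICT (by name: the statement is the Claim_ definition above) =====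
theorem card_count_spec : Claim_equal_card_count := by
  intro A B d _hDom hPre
  unfold Spec_card_count card_count card_count_alt
  rcases hPre with ⟨_hkeys, hsorted | hnone⟩
  · -- sorted input_num_B: the binary search decides exactly membership
    have hstep : (fun (acc : PySem.Dict Int Int) (i : Int) =>
          if card_count_search B i 0 (PySem.List.len B - 1) then acc.modify i 0 (· + 1) else acc)
        = (fun (acc : PySem.Dict Int Int) (i : Int) =>
          if PySem.Set.contains (PySem.Set.ofList B) i then acc.modify i 0 (· + 1) else acc) := by
      funext acc i
      rw [search_eq_mem B hsorted i]
      have : PySem.Set.contains (PySem.Set.ofList B) i = decide (i ∈ B) := by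
        simp [PySem.Set.contains, PySem.Set.mem_ofList]
      rw [this]
    rw [hstep]
  · -- no queried value occurs in input_num_B: neither side ever increments
    have hfold := PySem.List.foldl_congr_mem A
      (fun (acc : PySem.Dict Int Int) (i : Int) =>
        if card_count_search B i 0 (PySem.List.len B - 1) then acc.modify i 0 (· + 1) else acc)
      (fun (acc : PySem.Dict Int Int) (i : Int) =>
        if PySem.Set.contains (PySem.Set.ofList B) i then acc.modify i 0 (· + 1) else acc)
      (PySem.Dict.mk d) ?_
    · rw [hfold]
    · intro acc i hiA
      have hiB : i ∉ B := hnone i hiA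
      have h1 : card_count_search B i 0 (PySem.List.len B - 1) = false := by
        by_contra h
        simp only [Bool.not_eq_false] at h
        exact hiB (mem_of_search B i _ 0 _ rfl h)
      have h2 : PySem.Set.contains (PySem.Set.ofList B) i = false := by
        simp [PySem.Set.contains, PySem.Set.mem_ofList, hiB]
      simp only [h1, h2, Bool.false_eq_true, if_false]
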